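-- pv_equiv track=rewrite | github.com/eliottcassidy2000/math | 04-computation/W0_vanishing.py | tiling_transpose_pairs
-- ===== SOURCE A (Python) =====
-- def tiling_transpose_pairs(n):
--     edges = []
--     for i in range(n):
--         for j in range(i+2, n):
--             edges.append((i, j))
--     edge_to_idx = {e: idx for idx, e in enumerate(edges)}
--     pairs, fixed, seen = [], [], set()
--     for idx, (i, j) in enumerate(edges):
--         if idx in seen: continue
--         ti, tj = n-1-j, n-1-i
--         if ti > tj: ti, tj = tj, ti
--         if (ti, tj) == (i, j):
--             fixed.append(idx); seen.add(idx)
--         elif (ti, tj) in edge_to_idx: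
--             tidx = edge_to_idx[(ti, tj)]
--             pairs.append((idx, tidx)); seen.add(idx); seen.add(tidx)
--     return pairs, fixed
-- ===== SOURCE B (Python) =====
-- def tiling_transpose_pairs(n):
--     pairs, fixed = [], []
--     idx = 0
--     for i in range(n):
--         for j in range(i + 2, n):
--             if i + j == n - 1:
--                 fixed.append(idx)
--             else:
--                 ti, tj = n - 1 - j, n - 1 - i
--                 if (i, j) < (ti, tj):
--                     tidx = ti * (n - 2) - ti * (ti - 1) // 2 + (tj - ti - 2)
--                     pairs.append((idx, tidx))
--             idx += 1
--     return pairs, fixed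
-- ===== Notes on version B (the rewrite author's own statement) =====
-- stated objective: alternative
-- what changed: B drops A's materialized edge list, edge-to-index dictionary and seen set entirely: a single nested loop with a running index classifies each edge arithmetically (fixed when equal to its own transpose, emitted when lexicographically smaller than its transpose) and computes the partner's index by a closed-form position formula instead of a dictionary lookup.
import Mathlib
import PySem

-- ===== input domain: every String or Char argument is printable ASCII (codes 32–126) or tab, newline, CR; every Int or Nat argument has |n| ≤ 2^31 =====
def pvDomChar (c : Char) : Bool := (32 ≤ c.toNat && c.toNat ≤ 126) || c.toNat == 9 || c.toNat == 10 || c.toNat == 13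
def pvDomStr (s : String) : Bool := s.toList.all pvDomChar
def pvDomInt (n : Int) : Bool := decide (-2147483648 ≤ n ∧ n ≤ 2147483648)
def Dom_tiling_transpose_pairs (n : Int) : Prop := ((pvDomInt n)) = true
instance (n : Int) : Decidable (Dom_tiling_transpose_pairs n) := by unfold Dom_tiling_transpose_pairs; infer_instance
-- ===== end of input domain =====

-- B replaces A's edge list + index dictionary + seen set by a single nested loop with a
-- running index counter and a closed-form transpose-index formula (alternative decomposition).


-- ===== PORT A =====
-- edges = []; for i in range(n): for j in range(i+2, n): edges.append((i, j))
def ttpEdgesA (n : Int) : List (Int × Int) :=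
  (PySem.List.pyRange 0 n 1).foldl (fun acc i =>
    (PySem.List.pyRange (i + 2) n 1).foldl (fun acc2 j => acc2 ++ [(i, j)]) acc) []

-- edge_to_idx = {e: idx for idx, e in enumerate(edges)}
def ttpDictA (n : Int) : PySem.Dict (Int × Int) Int :=
  (PySem.List.enumerate (ttpEdgesA n) 0).foldl (fun d p => d.insert p.2 p.1) PySem.Dict.empty

-- the body of A's main loop (one iteration over (idx, (i, j)))
def ttpStepA (n : Int) (d : PySem.Dict (Int × Int) Int)
    (st : List (Int × Int) × List Int × PySem.Set Int) (p : Int × (Int × Int)) :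
    List (Int × Int) × List Int × PySem.Set Int :=
  let idx := p.1
  let i := p.2.1
  let j := p.2.2
  if PySem.Set.contains st.2.2 idx then st
  else
    let ti := n - 1 - j
    let tj := n - 1 - i
    let tp := if ti > tj then (tj, ti) else (ti, tj)
    if tp = (i, j) then (st.1, st.2.1 ++ [idx], PySem.Set.add st.2.2 idx)
    else
      match d.get? tp with
      | some tidx => (st.1 ++ [(idx, tidx)], st.2.1, PySem.Set.add (PySem.Set.add st.2.2 idx) tidx)
      | none => st

def tiling_transpose_pairs (n : Int) : (List (Int × Int)) × List Int :=
  let res := (PySem.List.enumerate (ttpEdgesA n) 0).foldl (ttpStepA n (ttpDictA n))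
    ([], [], PySem.Set.empty)
  (res.1, res.2.1)

-- ===== PORT B =====
-- the body of B's inner loop: classify edge (i, j) at running index idx
def ttpCoreB (n i : Int) (pf : List (Int × Int) × List Int) (idx j : Int) :
    List (Int × Int) × List Int :=
  if i + j = n - 1 then (pf.1, pf.2 ++ [idx])
  else
    let ti := n - 1 - j
    let tj := n - 1 - i
    if i < ti ∨ (i = ti ∧ j < tj) then
      (pf.1 ++ [(idx, ti * (n - 2) - PySem.Int.floordiv (ti * (ti - 1)) 2 + (tj - ti - 2))], pf.2)
    else pf

def tiling_transpose_pairs_alt (n : Int) : (List (Int × Int)) × List Int :=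
  ((PySem.List.pyRange 0 n 1).foldl (fun st i =>
      (PySem.List.pyRange (i + 2) n 1).foldl
        (fun (st : (List (Int × Int) × List Int) × Int) j => (ttpCoreB n i st.1 st.2 j, st.2 + 1))
        st)
    (([], []), 0)).1

-- ===== PRECONDITION & SPEC =====
def Spec_tiling_transpose_pairs (n : Int) (out : (List (Int × Int)) × List Int) : Prop := out = tiling_transpose_pairs_alt n
instance (n : Int) (out : (List (Int × Int)) × List Int) : Decidable (Spec_tiling_transpose_pairs n out) := by unfold Spec_tiling_transpose_pairs; infer_instance

-- ===== CLAIM (what is proved, stated in full; the proofs are below) =====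
def Claim_equal_tiling_transpose_pairs : Prop := ∀ (n : Int), Dom_tiling_transpose_pairs n → Spec_tiling_transpose_pairs n (tiling_transpose_pairs n)

-- ===== LEMMAS AND PROOFS =====

/-- An edge (a, b) of the enumeration: `0 ≤ a`, `a + 2 ≤ b < n`. -/
def pvValid (n a b : Int) : Prop := 0 ≤ a ∧ a + 2 ≤ b ∧ b < n

/-- Closed-form position of edge (a, b) in the enumeration (B's formula). -/
def pvF (n a b : Int) : Int :=
  a * (n - 2) - PySem.Int.floordiv (a * (a - 1)) 2 + (b - a - 2)

def pvRow (n i : Int) : List (Int × Int) :=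
  (PySem.List.pyRange (i + 2) n 1).map (fun j => (i, j))

def pvE (n : Int) : List (Int × Int) := (PySem.List.pyRange 0 n 1).flatMap (pvRow n)

lemma ttpEdgesA_eq (n : Int) : ttpEdgesA n = pvE n := by
  have h1 : ∀ (i : Int) (acc : List (Int × Int)),
      (PySem.List.pyRange (i + 2) n 1).foldl (fun acc2 j => acc2 ++ [(i, j)]) acc
        = acc ++ pvRow n i := fun i acc => PySem.List.foldl_append_singleton_eq_map ..
  unfold ttpEdgesA
  simp only [h1]
  exact PySem.List.foldl_append_eq_flatMap ..

lemma lenPrefix (n : Int) : ∀ (a : Int), 0 ≤ a → a ≤ n - 2 →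
    (((PySem.List.pyRange 0 a 1).flatMap (pvRow n)).length : Int)
      = a * (n - 2) - PySem.Int.floordiv (a * (a - 1)) 2 := by
  intro a h0
  induction a, h0 using Int.le_induction with
  | base =>
    intro _
    rw [PySem.List.pyRange_one_eq_nil le_rfl]
    simp [PySem.Int.floordiv]
  | succ a ha ih =>
    intro h2
    have hprev := ih (by omega)
    rw [PySem.List.pyRange_one_succ_right ha, List.flatMap_append]
    simp only [List.length_append, List.flatMap_cons, List.flatMap_nil, List.append_nil]
    have hrl : ((pvRow n a).length : Int) = n - a - 2 := by
      simp [pvRow, PySem.List.length_pyRange_one]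
      omega
    have e1 : PySem.Int.floordiv (a * (a - 1)) 2 * 2 + PySem.Int.mod (a * (a - 1)) 2 = a * (a - 1) :=
      PySem.Int.floordiv_mul_add_mod ..
    have e2 : PySem.Int.floordiv ((a + 1) * a) 2 * 2 + PySem.Int.mod ((a + 1) * a) 2 = (a + 1) * a :=
      PySem.Int.floordiv_mul_add_mod ..
    have m1 : PySem.Int.mod (a * (a - 1)) 2 = 0 := by
      rw [PySem.Int.mod_eq_zero_iff_dvd]
      rcases Int.even_mul_succ_self (a - 1) with ⟨k, hk⟩
      exact ⟨k, by linarith⟩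
    have m2 : PySem.Int.mod ((a + 1) * a) 2 = 0 := by
      rw [PySem.Int.mod_eq_zero_iff_dvd]
      rcases Int.even_mul_succ_self a with ⟨k, hk⟩
      exact ⟨k, by linarith⟩
    have hd : (a + 1) * a = a * (a - 1) + 2 * a := by ring
    have hm : (a + 1) * (n - 2) = a * (n - 2) + (n - 2) := by ring
    have hs : (a + 1) * (a + 1 - 1) = (a + 1) * a := by ring
    push_cast
    rw [hs]
    push_cast at hprev
    linarith

lemma pvE_pos (n a b : Int) (h : pvValid n a b) :
    ∃ m : ℕ, (pvE n)[m]? = some (a, b) ∧ (m : Int) = pvF n a b := by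
  obtain ⟨h0, h2, h3⟩ := h
  have hsplit : PySem.List.pyRange 0 n 1
      = PySem.List.pyRange 0 a 1 ++ PySem.List.pyRange a n 1 :=
    PySem.List.pyRange_one_append 0 a n h0 (by omega)
  have hcons : PySem.List.pyRange a n 1 = a :: PySem.List.pyRange (a + 1) n 1 :=
    PySem.List.pyRange_one_cons (by omega)
  set P := (PySem.List.pyRange 0 a 1).flatMap (pvRow n) with hP
  have hE : pvE n = P ++ (pvRow n a ++ (PySem.List.pyRange (a + 1) n 1).flatMap (pvRow n)) := by
    rw [pvE, hsplit, List.flatMap_append, hcons, List.flatMap_cons]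
  set t : ℕ := (b - a - 2).toNat with ht
  have htlt : t < (pvRow n a).length := by
    simp [pvRow, PySem.List.length_pyRange_one]
    omega
  refine ⟨P.length + t, ?_, ?_⟩
  · rw [hE, List.getElem?_append_right (by omega), Nat.add_sub_cancel_left,
      List.getElem?_append_left htlt]
    simp only [pvRow, List.getElem?_map, PySem.List.getElem?_pyRange_one]
    rw [if_pos (by omega)]
    simp only [Option.map_some]
    congr 2
    omega
  · have hlen := lenPrefix n a h0 (by omega)
    rw [← hP] at hlen
    have htv : (t : Int) = b - a - 2 := by omega
    rw [pvF, Nat.cast_add, hlen, htv]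

lemma pvE_mem (n : Int) (p : Int × Int) : p ∈ pvE n ↔ pvValid n p.1 p.2 := by
  obtain ⟨a, b⟩ := p
  simp [pvE, pvRow, List.mem_flatMap, PySem.List.mem_pyRange_one, pvValid]
  omega

lemma pvE_pairwise (n : Int) :
    (pvE n).Pairwise (fun p q => p.1 < q.1 ∨ (p.1 = q.1 ∧ p.2 < q.2)) := by
  have hmemrow : ∀ i (p : Int × Int), p ∈ pvRow n i → p.1 = i := by
    intro i p hp
    simp [pvRow] at hp
    obtain ⟨j, _, rfl⟩ := hp
    rfl
  rw [pvE, List.flatMap_def, List.pairwise_flatten]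
  constructor
  · intro l hl
    rw [List.mem_map] at hl
    obtain ⟨i, _, rfl⟩ := hl
    rw [pvRow, List.pairwise_map]
    refine (PySem.List.pairwise_lt_pyRange_one (i + 2) n).imp ?_
    intro x y hxy
    exact Or.inr ⟨rfl, hxy⟩
  · rw [List.pairwise_map]
    refine (PySem.List.pairwise_lt_pyRange_one 0 n).imp ?_
    intro i i' hii' p hp q hq
    rw [hmemrow i p hp, hmemrow i' q hq]
    exact Or.inl hii'

lemma pvE_nodup (n : Int) : (pvE n).Nodup := by
  refine (pvE_pairwise n).imp ?_
  intro p q h heq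
  subst heq
  rcases h with h | ⟨-, h⟩ <;> exact lt_irrefl _ h

lemma pvF_nonneg (n a b : Int) (h : pvValid n a b) : 0 ≤ pvF n a b := by
  obtain ⟨m, _, hm⟩ := pvE_pos n a b h
  omega

lemma pvF_inj (n a b a' b' : Int) (h : pvValid n a b) (h' : pvValid n a' b')
    (he : pvF n a b = pvF n a' b') : a = a' ∧ b = b' := by
  obtain ⟨m, hg, hm⟩ := pvE_pos n a b h
  obtain ⟨m', hg', hm'⟩ := pvE_pos n a' b' h'
  have : m = m' := by omega
  subst this
  rw [hg] at hg'
  simp at hg'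
  exact hg'

lemma pvF_lt_iff (n a b a' b' : Int) (h : pvValid n a b) (h' : pvValid n a' b') :
    pvF n a b < pvF n a' b' ↔ (a < a' ∨ (a = a' ∧ b < b')) := by
  obtain ⟨mp, hgp, hmp⟩ := pvE_pos n a b h
  obtain ⟨mq, hgq, hmq⟩ := pvE_pos n a' b' h'
  have hpw := List.pairwise_iff_getElem.mp (pvE_pairwise n)
  rw [List.getElem?_eq_some_iff] at hgp hgq
  obtain ⟨hp1, hp2⟩ := hgp
  obtain ⟨hq1, hq2⟩ := hgq
  rcases lt_trichotomy mp mq with hlt | heq | hgt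
  · have := hpw mp mq hp1 hq1 hlt
    rw [hp2, hq2] at this
    simp at this
    constructor <;> intro _ <;> [exact this; omega]
  · subst heq
    rw [hp2] at hq2
    injection hq2 with e1 e2
    subst e1; subst e2
    omega
  · have := hpw mq mp hq1 hp1 hgt
    rw [hp2, hq2] at this
    simp at this
    constructor <;> intro hc <;> omega

/-- The dictionary built by folding inserts over an enumeration of a duplicate-free list. -/
lemma dictFold_get? {α : Type} [BEq α] [LawfulBEq α] (l : List α) :
    ∀ (s : Int) (d0 : PySem.Dict α Int), l.Nodup → ∀ (k : α),
    ((PySem.List.enumerate l s).foldl (fun d p => d.insert p.2 p.1) d0).get? k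
      = match PySem.List.index? l k with
        | some m => some (s + m)
        | none => d0.get? k := by
  induction l with
  | nil => intro s d0 _ k; simp [PySem.List.enumerate_nil, PySem.List.index?_eq_idxOf?]
  | cons x xs ih =>
    intro s d0 hnd k
    rw [PySem.List.enumerate_cons, List.foldl_cons]
    rcases List.nodup_cons.mp hnd with ⟨hx, hnd'⟩
    by_cases hk : k = x
    · subst hk
      rw [ih (s + 1) _ hnd' k, PySem.List.index?_cons_self,
        (PySem.List.index?_eq_none_iff xs k).mpr hx]
      simp [PySem.Dict.get?_insert_self]
    · rw [ih (s + 1) _ hnd' k, PySem.List.index?_cons_of_ne xs (Ne.symm hk)]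
      cases hidx : PySem.List.index? xs k with
      | some m => simp; ring
      | none => simp [PySem.Dict.get?_insert_of_ne _ _ hk]

lemma pvE_index? (n a b : Int) (h : pvValid n a b) :
    ∃ m : ℕ, PySem.List.index? (pvE n) (a, b) = some m ∧ (m : Int) = pvF n a b := by
  obtain ⟨m, hg, hm⟩ := pvE_pos n a b h
  rw [List.getElem?_eq_some_iff] at hg
  obtain ⟨hlt, hv⟩ := hg
  refine ⟨m, ?_, hm⟩
  rw [PySem.List.index?_eq_some_iff]
  refine ⟨(pvE n).take m, (pvE n).drop (m + 1), ?_, by simp [List.length_take]; omega, ?_⟩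
  · conv_lhs => rw [← List.take_append_drop m (pvE n)]
    rw [List.drop_eq_getElem_cons hlt, hv]
  · intro hmem
    obtain ⟨t, ht, hv'⟩ := List.getElem_of_mem hmem
    have ht' : t < m := by rw [List.length_take] at ht; omega
    rw [List.getElem_take] at hv'
    have : t = m := by
      refine List.getElem?_inj (by omega) (pvE_nodup n) ?_
      rw [List.getElem?_eq_getElem (by omega), List.getElem?_eq_getElem hlt, hv', hv]
    omega

lemma ttpDictA_get (n a b : Int) (h : pvValid n a b) :
    (ttpDictA n).get? (a, b) = some (pvF n a b) := by
  obtain ⟨m, hi, hm⟩ := pvE_index? n a b h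
  unfold ttpDictA
  rw [ttpEdgesA_eq, dictFold_get? (pvE n) 0 PySem.Dict.empty (pvE_nodup n) (a, b), hi]
  simp
  omega

lemma foldl_counter {σ α : Type} (g : σ → Int → α → σ) (l : List α) :
    ∀ (s : σ) (c : Int),
    l.foldl (fun st x => (g st.1 st.2 x, st.2 + 1)) (s, c)
      = ((PySem.List.enumerate l c).foldl (fun t p => g t p.1 p.2) s, c + l.length) := by
  induction l with
  | nil => intro s c; simp [PySem.List.enumerate_nil]
  | cons x xs ih =>
    intro s c
    rw [List.foldl_cons, PySem.List.enumerate_cons, List.foldl_cons, ih]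
    simp
    ring

lemma altB_eq (n : Int) :
    tiling_transpose_pairs_alt n
      = (PySem.List.enumerate (pvE n) 0).foldl
          (fun t p => ttpCoreB n p.2.1 t p.1 p.2.2) ([], []) := by
  unfold tiling_transpose_pairs_alt
  have h1 : ∀ (i : Int) (st : (List (Int × Int) × List Int) × Int),
      (PySem.List.pyRange (i + 2) n 1).foldl
        (fun (st : (List (Int × Int) × List Int) × Int) j => (ttpCoreB n i st.1 st.2 j, st.2 + 1)) st
        = (pvRow n i).foldl
            (fun (st : (List (Int × Int) × List Int) × Int) p => (ttpCoreB n p.1 st.1 st.2 p.2, st.2 + 1)) st := by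
    intro i st
    rw [pvRow, List.foldl_map]
  simp only [h1]
  rw [← List.foldl_flatMap, ← pvE,
    foldl_counter (fun t idx p => ttpCoreB n p.1 t idx p.2) (pvE n) ([], []) 0]

lemma trans_valid (n a b : Int) (h : pvValid n a b) : pvValid n (n - 1 - b) (n - 1 - a) := by
  unfold pvValid at *; omega

lemma main_loop (n : Int) (l : List (Int × Int)) :
    ∀ (k : Int) (pairs : List (Int × Int)) (fixed : List Int) (seen : PySem.Set Int),
    (∀ p ∈ PySem.List.enumerate l k, pvValid n p.2.1 p.2.2 ∧ p.1 = pvF n p.2.1 p.2.2) →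
    (∀ m : Int, k ≤ m → (m ∈ seen ↔ ∃ a b : Int, pvValid n a b ∧ m = pvF n a b ∧
        pvF n (n - 1 - b) (n - 1 - a) < k)) →
    (((PySem.List.enumerate l k).foldl (ttpStepA n (ttpDictA n)) (pairs, fixed, seen)).1,
     ((PySem.List.enumerate l k).foldl (ttpStepA n (ttpDictA n)) (pairs, fixed, seen)).2.1)
      = (PySem.List.enumerate l k).foldl (fun t p => ttpCoreB n p.2.1 t p.1 p.2.2) (pairs, fixed) := by
  induction l with
  | nil => intro k pairs fixed seen _ _; simp [PySem.List.enumerate_nil]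
  | cons e l' ih =>
    rintro k pairs fixed seen H Inv
    obtain ⟨i, j⟩ := e
    rw [PySem.List.enumerate_cons, List.foldl_cons, List.foldl_cons]
    obtain ⟨hval, hk⟩ := H (k, (i, j)) List.mem_cons_self
    simp only at hval hk
    have H' : ∀ p ∈ PySem.List.enumerate l' (k + 1),
        pvValid n p.2.1 p.2.2 ∧ p.1 = pvF n p.2.1 p.2.2 := by
      intro p hp
      exact H p (by rw [PySem.List.enumerate_cons]; exact List.mem_cons_of_mem _ hp)
    have hvt : pvValid n (n - 1 - j) (n - 1 - i) := trans_valid n i j hval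
    have hseen : k ∈ seen ↔ pvF n (n - 1 - j) (n - 1 - i) < k := by
      rw [Inv k le_rfl]
      constructor
      · rintro ⟨a, b, hv, hm, hlt⟩
        obtain ⟨rfl, rfl⟩ := pvF_inj n a b i j hv hval (by omega)
        exact hlt
      · intro hlt
        exact ⟨i, j, hval, hk, hlt⟩
    have hnoswap : ¬ (n - 1 - j > n - 1 - i) := by unfold pvValid at hval; omega
    have hAstep : ∀ st : List (Int × Int) × List Int × PySem.Set Int,
        ttpStepA n (ttpDictA n) st (k, (i, j))
          = if PySem.Set.contains st.2.2 k then st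
            else if (n - 1 - j, n - 1 - i) = (i, j) then
              (st.1, st.2.1 ++ [k], PySem.Set.add st.2.2 k)
            else
              (st.1 ++ [(k, pvF n (n - 1 - j) (n - 1 - i))], st.2.1,
                PySem.Set.add (PySem.Set.add st.2.2 k) (pvF n (n - 1 - j) (n - 1 - i))) := by
      intro st
      unfold ttpStepA
      simp only [if_neg hnoswap]
      by_cases hc : PySem.Set.contains st.2.2 k = true
      · rw [if_pos hc, if_pos hc]
      · rw [if_neg hc, if_neg hc]
        by_cases hfix' : (n - 1 - j, n - 1 - i) = (i, j)
        · rw [if_pos hfix', if_pos hfix']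
        · rw [if_neg hfix', if_neg hfix', ttpDictA_get n _ _ hvt]
    by_cases hfix : i + j = n - 1
    · -- fixed edge: equal to its own transpose
      have hfp : (n - 1 - j, n - 1 - i) = (i, j) := by
        unfold pvValid at hval; rw [Prod.mk.injEq]; omega
      have hft : pvF n (n - 1 - j) (n - 1 - i) = k := by
        have e1 : n - 1 - j = i := by omega
        have e2 : n - 1 - i = j := by omega
        rw [e1, e2]; omega
      have hcontains : ¬ (PySem.Set.contains seen k = true) := by
        rw [PySem.Set.contains_iff, hseen]; omega
      rw [hAstep, if_neg hcontains, if_pos hfp]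
      have hBstep : ttpCoreB n i (pairs, fixed) k j = (pairs, fixed ++ [k]) := by
        rw [ttpCoreB, if_pos hfix]
      rw [hBstep]
      refine ih (k + 1) pairs (fixed ++ [k]) (PySem.Set.add seen k) H' ?_
      intro m hm
      rw [PySem.Set.mem_add, Inv m (by omega)]
      constructor
      · rintro (⟨a, b, hv, hmf, hlt⟩ | rfl)
        · exact ⟨a, b, hv, hmf, by omega⟩
        · omega
      · rintro ⟨a, b, hv, hmf, hlt⟩
        rcases lt_or_eq_of_le (Int.lt_add_one_iff.mp hlt) with hlt' | heq
        · exact Or.inl ⟨a, b, hv, hmf, hlt'⟩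
        · exfalso
          obtain ⟨e1, e2⟩ := pvF_inj n (n - 1 - b) (n - 1 - a) i j (trans_valid n a b hv) hval (by omega)
          have ha : a = i := by omega
          have hb : b = j := by omega
          rw [ha, hb] at hmf
          omega
    · by_cases hlex : i < n - 1 - j ∨ (i = n - 1 - j ∧ j < n - 1 - i)
      · -- the lexicographically smaller member of a transpose pair
        have hfp : ¬ ((n - 1 - j, n - 1 - i) = (i, j)) := by
          rw [Prod.mk.injEq]; omega
        have hgt : k < pvF n (n - 1 - j) (n - 1 - i) := by
          rw [hk, pvF_lt_iff n i j _ _ hval hvt]; exact hlex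
        have hcontains : ¬ (PySem.Set.contains seen k = true) := by
          rw [PySem.Set.contains_iff, hseen]; omega
        rw [hAstep, if_neg hcontains, if_neg hfp]
        have hBstep : ttpCoreB n i (pairs, fixed) k j
            = (pairs ++ [(k, pvF n (n - 1 - j) (n - 1 - i))], fixed) := by
          rw [ttpCoreB, if_neg hfix]
          simp only
          rw [if_pos hlex]
          rfl
        rw [hBstep]
        refine ih (k + 1) _ _ _ H' ?_
        intro m hm
        rw [PySem.Set.mem_add, PySem.Set.mem_add, Inv m (by omega)]
        constructor
        · rintro ((⟨a, b, hv, hmf, hlt⟩ | rfl) | rfl)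
          · exact ⟨a, b, hv, hmf, by omega⟩
          · omega
          · refine ⟨n - 1 - j, n - 1 - i, hvt, rfl, ?_⟩
            have e1 : n - 1 - (n - 1 - i) = i := by omega
            have e2 : n - 1 - (n - 1 - j) = j := by omega
            rw [e1, e2]
            omega
        · rintro ⟨a, b, hv, hmf, hlt⟩
          rcases lt_or_eq_of_le (Int.lt_add_one_iff.mp hlt) with hlt' | heq
          · exact Or.inl (Or.inl ⟨a, b, hv, hmf, hlt'⟩)
          · obtain ⟨e1, e2⟩ := pvF_inj n (n - 1 - b) (n - 1 - a) i j (trans_valid n a b hv) hval (by omega)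
            right
            rw [hmf]
            congr 1 <;> omega
      · -- the larger member of a transpose pair: skipped by both
        have hlt : pvF n (n - 1 - j) (n - 1 - i) < k := by
          rw [hk, pvF_lt_iff n _ _ i j hvt hval]
          unfold pvValid at hval; omega
        have hcontains : PySem.Set.contains seen k = true := by
          rw [PySem.Set.contains_iff, hseen]; exact hlt
        rw [hAstep, if_pos hcontains]
        have hBstep : ttpCoreB n i (pairs, fixed) k j = (pairs, fixed) := by
          rw [ttpCoreB, if_neg hfix]
          simp only
          rw [if_neg hlex]
        rw [hBstep]
        refine ih (k + 1) _ _ _ H' ?_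
        intro m hm
        rw [Inv m (by omega)]
        constructor
        · rintro ⟨a, b, hv, hmf, hlt'⟩
          exact ⟨a, b, hv, hmf, by omega⟩
        · rintro ⟨a, b, hv, hmf, hlt'⟩
          rcases lt_or_eq_of_le (Int.lt_add_one_iff.mp hlt') with h' | heq
          · exact ⟨a, b, hv, hmf, h'⟩
          · exfalso
            obtain ⟨e1, e2⟩ := pvF_inj n (n - 1 - b) (n - 1 - a) i j (trans_valid n a b hv) hval (by omega)
            have hab : a = n - 1 - j ∧ b = n - 1 - i := by omega
            have : m = pvF n (n - 1 - j) (n - 1 - i) := by rw [hmf, hab.1, hab.2]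
            omega

-- ===== VERDICT (by name: the statement is the Claim_ definition above) =====
theorem tiling_transpose_pairs_spec : Claim_equal_tiling_transpose_pairs := by
  intro n _
  unfold Spec_tiling_transpose_pairs tiling_transpose_pairs
  rw [altB_eq, ttpEdgesA_eq]
  refine main_loop n (pvE n) 0 [] [] PySem.Set.empty ?_ ?_
  · intro p hp
    rw [PySem.List.mem_enumerate_iff] at hp
    obtain ⟨t, ht, rfl⟩ := hp
    have hv : pvValid n (pvE n)[t].1 (pvE n)[t].2 := by
      rw [← pvE_mem]
      exact List.getElem_mem ht
    refine ⟨hv, ?_⟩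
    obtain ⟨m, hg, hm⟩ := pvE_pos n (pvE n)[t].1 (pvE n)[t].2 hv
    have : t = m := by
      refine List.getElem?_inj ht (pvE_nodup n) ?_
      rw [hg, List.getElem?_eq_getElem ht]
    simp only [zero_add]
    omega
  · intro m _
    constructor
    · intro hm
      simp [PySem.Set.empty] at hm
    · rintro ⟨a, b, hv, _, hlt⟩
      have := pvF_nonneg n (n - 1 - b) (n - 1 - a) (trans_valid n a b hv)
      omega
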